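-- pv_equiv track=rewrite | github.com/AWT-01-API/katas | src/Angelica/kata_bank/Converter.py | get_code_matrix_list
-- ===== SOURCE A (Python) =====
-- def get_code_matrix_list(codelineslist):
--     matrix_list = [[], [], [], [], [], [], [], [], [], ]
--     lastindex = 0
--     for index in range(0, len(matrix_list)):
--         nextindex = lastindex + 3
--         for line in codelineslist:
--             line_to_split = list(line)
--             matrix_l = line_to_split[lastindex:nextindex]
--             if len(matrix_l) < 3:
--                 matrix_l = [' ', ' ', ' ']
--             matrix_l = [s.replace('\r', ' ') for s in matrix_l]
--             matrix_list[index].append(matrix_l)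
--         lastindex = nextindex
--     return matrix_list
-- ===== SOURCE B (Python) =====
-- def get_code_matrix_list(codelineslist):
--     # Row-major staging then transpose: clean each whole line once up front,
--     # build its 9-chunk row with an arithmetic bound check, then flip the
--     # row matrix into columns with zip(*rows).
--     rows = []
--     for line in codelineslist:
--         s = [' ' if c == '\r' else c for c in line]
--         rows.append([s[k:k + 3] if k + 3 <= len(s) else [' ', ' ', ' ']
--                      for k in range(0, 27, 3)])
--     return [list(col) for col in zip(*rows)] if rows else [[] for _ in range(9)]
-- ===== Notes on version B (the rewrite author's own statement) =====
-- stated objective: alternative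
-- what changed: B stages the computation differently: it cleans each line once with a string-level replace, builds the line's nine chunks as one row using an arithmetic bound check (k+3 <= len) instead of measuring slice lengths, and obtains the columns by transposing the row matrix with zip(*rows), whereas A mutates nine column lists in place over nine full passes of the line list.
import Mathlib
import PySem

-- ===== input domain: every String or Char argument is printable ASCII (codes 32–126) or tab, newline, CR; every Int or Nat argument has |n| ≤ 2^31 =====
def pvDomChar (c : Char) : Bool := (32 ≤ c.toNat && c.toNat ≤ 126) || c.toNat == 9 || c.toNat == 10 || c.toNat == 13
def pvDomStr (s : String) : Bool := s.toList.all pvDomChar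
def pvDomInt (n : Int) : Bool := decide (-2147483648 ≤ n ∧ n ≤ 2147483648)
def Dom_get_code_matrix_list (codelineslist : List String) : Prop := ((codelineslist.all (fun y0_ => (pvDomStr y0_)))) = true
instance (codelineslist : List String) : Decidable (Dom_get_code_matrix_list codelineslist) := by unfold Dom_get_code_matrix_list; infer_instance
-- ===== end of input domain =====

-- B cleans each line once, builds the line's nine chunks as one row, and transposes the
-- row matrix with zip(*rows), instead of A's nine column-major passes over the line list.

-- ===== PORT A =====
-- literal port of A: outer loop over range(0, len(matrix_list)) with running lastindex,
-- inner loop over the lines appending a chunk to matrix_list[index]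
def get_code_matrix_list (codelineslist : List String) : List (List (List String)) :=
  let matrix_list : List (List (List String)) := [[], [], [], [], [], [], [], [], []]
  let r := (PySem.List.pyRange 0 (matrix_list.length : Int) 1).foldl
    (fun (st : List (List (List String)) × Int) index =>
      let nextindex : Int := st.2 + 3
      let m' := codelineslist.foldl
        (fun (m : List (List (List String))) line =>
          let line_to_split := line.toList.map (fun c => String.ofList [c])
          let matrix_l := PySem.List.slice line_to_split (some st.2) (some nextindex)
          let matrix_l := if matrix_l.length < 3 then [" ", " ", " "] else matrix_l
          -- s.replace('\r', ' '): exact, because every s here is a single-character string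
          let matrix_l := matrix_l.map (fun s => if s = "\r" then " " else s)
          m.set index.toNat ((m.getD index.toNat []) ++ [matrix_l]))
        st.1
      (m', nextindex))
    (matrix_list, 0)
  r.1

-- ===== PORT B =====
-- [' ' if c=='\r' else c for c in line]; then the nine chunks of the row:
-- [s[k:k+3] if k+3 <= len(s) else [' ',' ',' '] for k in range(0,27,3)]
def pvCleanRow (line : String) : List (List String) :=
  let s : List String := line.toList.map (fun c => if c = '\r' then " " else String.ofList [c])
  (PySem.List.pyRange 0 27 3).map (fun k =>
    if k + 3 ≤ (s.length : Int) then PySem.List.slice s (some k) (some (k + 3))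
    else [" ", " ", " "])

-- zip(*rows): element i pairs the i-th entry of every row, up to the shortest row
def pvZipStar (rows : List (List (List String))) : List (List (List String)) :=
  match rows with
  | [] => []
  | r :: rs =>
    let m := rs.foldl (fun m row => min m row.length) r.length
    (List.range m).map (fun i => (r :: rs).map (fun row => row.getD i []))

def get_code_matrix_list_alt (codelineslist : List String) : List (List (List String)) :=
  let rows := codelineslist.map pvCleanRow
  if rows.isEmpty then List.replicate 9 [] else pvZipStar rows

-- ===== PRECONDITION & SPEC =====
def Spec_get_code_matrix_list (codelineslist : List String) (out : List (List (List String))) : Prop := out = get_code_matrix_list_alt codelineslist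
instance (codelineslist : List String) (out : List (List (List String))) : Decidable (Spec_get_code_matrix_list codelineslist out) := by unfold Spec_get_code_matrix_list; infer_instance

-- ===== CLAIM (what is proved, stated in full; the proofs are below) =====
def Claim_equal_get_code_matrix_list : Prop := ∀ (codelineslist : List String), Dom_get_code_matrix_list codelineslist → Spec_get_code_matrix_list codelineslist (get_code_matrix_list codelineslist)

-- ===== LEMMAS AND PROOFS =====

-- A's chunk of a line at character offset li (proof helper)
def pvChunkA (li : Int) (line : String) : List String :=
  (if (PySem.List.slice (line.toList.map (fun c => String.ofList [c])) (some li) (some (li + 3))).length < 3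
   then [" ", " ", " "]
   else PySem.List.slice (line.toList.map (fun c => String.ofList [c])) (some li) (some (li + 3))).map
    (fun s => if s = "\r" then " " else s)

-- B's chunk at offset k (proof helper; the body of pvCleanRow's comprehension)
def pvChunkB (k : Int) (line : String) : List String :=
  let s : List String := line.toList.map (fun c => if c = '\r' then " " else String.ofList [c])
  if k + 3 ≤ (s.length : Int) then PySem.List.slice s (some k) (some (k + 3))
  else [" ", " ", " "]

-- A's inner loop appends one column to slot i of the matrix
theorem pv_foldA (g : String → List String) (i : Nat) :
    ∀ (ls : List String) (mat : List (List (List String))), i < mat.length →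
    ls.foldl (fun m line => m.set i ((m[i]?.getD []) ++ [g line])) mat
      = mat.set i ((mat[i]?.getD []) ++ ls.map g) := by
  intro ls
  induction ls with
  | nil =>
    intro mat h
    simp only [List.foldl_nil, List.map_nil, List.append_nil]
    rw [List.getElem?_eq_getElem (by simpa using h), Option.getD_some]
    exact (List.set_getElem_self (by simpa using h)).symm
  | cons l ls ih =>
    intro mat h
    simp only [List.foldl_cons, List.map_cons]
    rw [ih _ (by simpa using h)]
    have hx : ∀ X : List (List String), (mat.set i X)[i]?.getD [] = X := by
      intro X
      rw [List.getElem?_eq_getElem (by simpa using h), List.getElem_set_self (by simpa using h),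
          Option.getD_some]
    rw [hx, List.set_set]
    simp

-- the two chunk computations agree at every offset 3*j
theorem pv_chunk_eq (j : Nat) (line : String) :
    pvChunkB ((3 * j : Nat) : Int) line = pvChunkA ((3 * j : Nat) : Int) line := by
  have hs : ∀ (f : Char → String),
      PySem.List.slice (line.toList.map f) (some ((3 * j : Nat) : Int)) (some (((3 * j : Nat) : Int) + 3))
      = ((line.toList.drop (3 * j)).take 3).map f := by
    intro f
    rw [show (((3 * j : Nat) : Int) + 3) = (((3 * j + 3 : Nat)) : Int) by push_cast; ring]
    rw [PySem.List.slice_natCast, show 3 * j + 3 - 3 * j = 3 from by omega,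
        List.map_take, List.map_drop]
  simp only [pvChunkA, pvChunkB]
  rw [hs, hs]
  simp only [List.length_map]
  have hlen : ((line.toList.drop (3 * j)).take 3).length = min 3 (line.toList.length - 3 * j) := by
    simp
  by_cases h : 3 * j + 3 ≤ line.toList.length
  · have hcond : ((3 * j : Nat) : Int) + 3 ≤ ((line.toList.length : Nat) : Int) := by push_cast; omega
    have hA : ¬ ((line.toList.drop (3 * j)).take 3).length < 3 := by omega
    rw [if_pos hcond, if_neg hA, List.map_map]
    apply List.map_congr_left
    intro c _
    by_cases hc : c = '\r'
    · subst hc; simp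
    · have hne : ¬ (String.ofList [c] = "\r") := by
        intro hh
        exact hc (by simpa using congrArg String.toList hh)
      simp [Function.comp, hne, hc]
  · have hcond : ¬ (((3 * j : Nat) : Int) + 3 ≤ ((line.toList.length : Nat) : Int)) := by
      push_cast; omega
    have hA : ((line.toList.drop (3 * j)).take 3).length < 3 := by omega
    rw [if_neg hcond, if_pos hA]
    decide

-- each row B builds is exactly the nine chunks of the line
theorem pv_row_eq (line : String) :
    pvCleanRow line = [pvChunkB 0 line, pvChunkB 3 line, pvChunkB 6 line, pvChunkB 9 line,
      pvChunkB 12 line, pvChunkB 15 line, pvChunkB 18 line, pvChunkB 21 line, pvChunkB 24 line] := by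
  rw [show pvCleanRow line = (PySem.List.pyRange 0 27 3).map (fun k => pvChunkB k line) from rfl]
  rw [show PySem.List.pyRange 0 27 3 = [0, 3, 6, 9, 12, 15, 18, 21, 24] from by decide]
  rfl

theorem pv_fold_min_nine :
    ∀ (rs : List (List (List String))), (∀ x ∈ rs, x.length = 9) →
    rs.foldl (fun m row => min m row.length) 9 = 9 := by
  intro rs
  induction rs with
  | nil => intro _; rfl
  | cons r rs ih =>
    intro h
    have hr : r.length = 9 := h r (by simp)
    simp only [List.foldl_cons, hr, min_self]
    exact ih (fun x hx => h x (by simp [hx]))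

-- ===== VERDICT (by name: the statement is the Claim_ definition above) =====
theorem get_code_matrix_list_spec : Claim_equal_get_code_matrix_list := by
  intro ls _
  unfold Spec_get_code_matrix_list
  -- reduce A to its nine columns
  have hA : get_code_matrix_list ls =
      [ls.map (pvChunkA 0), ls.map (pvChunkA 3), ls.map (pvChunkA 6),
       ls.map (pvChunkA 9), ls.map (pvChunkA 12), ls.map (pvChunkA 15),
       ls.map (pvChunkA 18), ls.map (pvChunkA 21), ls.map (pvChunkA 24)] := by
    simp only [get_code_matrix_list]
    rw [show PySem.List.pyRange 0 (([[], [], [], [], [], [], [], [], []] :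
          List (List (List String))).length : Int) 1 = [0,1,2,3,4,5,6,7,8] from by decide]
    simp only [List.foldl_cons, List.foldl_nil]
    simp [pv_foldA, pvChunkA]
  cases ls with
  | nil =>
    rw [hA]
    rfl
  | cons a as =>
    have hrowlen : ∀ x ∈ (a :: as).map pvCleanRow, x.length = 9 := by
      intro x hx
      obtain ⟨l, _, rfl⟩ := List.mem_map.mp hx
      rw [pv_row_eq]; rfl
    -- reduce B to its nine columns
    have hB : get_code_matrix_list_alt (a :: as) =
        (List.range 9).map (fun i => ((pvCleanRow a) :: as.map pvCleanRow).map (fun row => row.getD i [])) := by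
      simp only [get_code_matrix_list_alt, List.map_cons, List.isEmpty_cons, pvZipStar,
        Bool.false_eq_true, if_false]
      rw [show (as.map pvCleanRow).foldl (fun m row => min m row.length) (pvCleanRow a).length = 9 from by
        rw [show (pvCleanRow a).length = 9 from by rw [pv_row_eq]; rfl]
        exact pv_fold_min_nine _ (fun x hx => hrowlen x (by simp [hx]))]
    have hget : ∀ (l : String) (j : Nat), j < 9 → (pvCleanRow l).getD j [] = pvChunkB ((3 * j : Nat) : Int) l := by
      intro l j hj
      rw [pv_row_eq]
      interval_cases j <;> simp [List.getD]
    have e0 : ∀ l : String, (pvCleanRow l).getD 0 [] = pvChunkA 0 l := fun l => by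
      simpa using (hget l 0 (by omega)).trans (pv_chunk_eq 0 l)
    have e1 : ∀ l : String, (pvCleanRow l).getD 1 [] = pvChunkA 3 l := fun l => by
      simpa using (hget l 1 (by omega)).trans (pv_chunk_eq 1 l)
    have e2 : ∀ l : String, (pvCleanRow l).getD 2 [] = pvChunkA 6 l := fun l => by
      simpa using (hget l 2 (by omega)).trans (pv_chunk_eq 2 l)
    have e3 : ∀ l : String, (pvCleanRow l).getD 3 [] = pvChunkA 9 l := fun l => by
      simpa using (hget l 3 (by omega)).trans (pv_chunk_eq 3 l)
    have e4 : ∀ l : String, (pvCleanRow l).getD 4 [] = pvChunkA 12 l := fun l => by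
      simpa using (hget l 4 (by omega)).trans (pv_chunk_eq 4 l)
    have e5 : ∀ l : String, (pvCleanRow l).getD 5 [] = pvChunkA 15 l := fun l => by
      simpa using (hget l 5 (by omega)).trans (pv_chunk_eq 5 l)
    have e6 : ∀ l : String, (pvCleanRow l).getD 6 [] = pvChunkA 18 l := fun l => by
      simpa using (hget l 6 (by omega)).trans (pv_chunk_eq 6 l)
    have e7 : ∀ l : String, (pvCleanRow l).getD 7 [] = pvChunkA 21 l := fun l => by
      simpa using (hget l 7 (by omega)).trans (pv_chunk_eq 7 l)
    have e8 : ∀ l : String, (pvCleanRow l).getD 8 [] = pvChunkA 24 l := fun l => by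
      simpa using (hget l 8 (by omega)).trans (pv_chunk_eq 8 l)
    rw [hA, hB]
    rw [show List.range 9 = [0,1,2,3,4,5,6,7,8] from by decide]
    simp only [List.map_cons, List.map_nil, List.map_map, Function.comp_def]
    simp only [e0, e1, e2, e3, e4, e5, e6, e7, e8]
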